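-- pv_equiv track=rewrite | github.com/Ananth1-9/CSC-110 | Programming projects/infofile.py | count_sizes
-- ===== SOURCE A (Python) =====
-- def count_sizes(word_counts):
--     """
--     Counts the number of UNIQUE words in each size category.
--     Args:
--         word_counts (dict): A dictionary with words
--         as keys and their counts as values.
--     Returns:
--         tuple: A tuple containing counts of
--         small, medium, and large words.
--     """
--     s, m, l = 0, 0, 0
--     for word in word_counts:
--         length = len(word)
--         if 0 <= length <= 4:
--             s += 1
--         elif 5 <= length <= 7:
--             m += 1
--         elif length >= 8:
--             l += 1
--     return (s, m, l)
-- ===== SOURCE B (Python) =====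
-- def count_sizes(word_counts):
--     s = sum(1 for w in word_counts if len(w) <= 4)
--     m = sum(1 for w in word_counts if 5 <= len(w) <= 7)
--     l = sum(1 for w in word_counts if len(w) >= 8)
--     return (s, m, l)
-- ===== Notes on version B (the rewrite author's own statement) =====
-- stated objective: alternative
-- what changed: Replaces A's single fused branch-chained loop with three independent one-band counting reductions over the keys, one per size category.
import Mathlib
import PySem

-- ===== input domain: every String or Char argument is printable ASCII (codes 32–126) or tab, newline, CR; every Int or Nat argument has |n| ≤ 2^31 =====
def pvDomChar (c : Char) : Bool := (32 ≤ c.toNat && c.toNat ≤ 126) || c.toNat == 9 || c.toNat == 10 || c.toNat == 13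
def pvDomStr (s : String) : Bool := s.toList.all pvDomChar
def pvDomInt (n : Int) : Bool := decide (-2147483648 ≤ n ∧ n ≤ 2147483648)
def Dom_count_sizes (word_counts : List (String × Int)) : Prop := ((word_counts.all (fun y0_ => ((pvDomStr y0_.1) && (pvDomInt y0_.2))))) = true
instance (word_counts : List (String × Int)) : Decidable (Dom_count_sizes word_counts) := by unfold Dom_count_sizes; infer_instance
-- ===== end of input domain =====

-- B replaces A's single fused branch-chained loop with three independent per-band counts (alternative decomposition, same cost).

-- ===== PORT A =====
-- one pass over the keys, branch chain updating (s, m, l)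
def count_sizes (word_counts : List (String × Int)) : Int × Int × Int :=
  let step : (Int × Int × Int) → (String × Int) → (Int × Int × Int) :=
    fun acc kv =>
      let (s, m, l) := acc
      let length : Int := PySem.Str.len kv.1
      if 0 ≤ length ∧ length ≤ 4 then (s + 1, m, l)
      else if 5 ≤ length ∧ length ≤ 7 then (s, m + 1, l)
      else if 8 ≤ length then (s, m, l + 1)
      else (s, m, l)
  word_counts.foldl step (0, 0, 0)

-- ===== PORT B =====
-- three independent 0/1-sums over the keys, one per band
def count_sizes_alt (word_counts : List (String × Int)) : Int × Int × Int :=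
  let s : Int := (word_counts.map (fun kv => if PySem.Str.len kv.1 ≤ 4 then (1 : Int) else 0)).sum
  let m : Int := (word_counts.map (fun kv => if 5 ≤ PySem.Str.len kv.1 ∧ PySem.Str.len kv.1 ≤ 7 then (1 : Int) else 0)).sum
  let l : Int := (word_counts.map (fun kv => if 8 ≤ PySem.Str.len kv.1 then (1 : Int) else 0)).sum
  (s, m, l)

-- ===== PRECONDITION & SPEC =====
def Spec_count_sizes (word_counts : List (String × Int)) (out : Int × Int × Int) : Prop := out = count_sizes_alt word_counts
instance (word_counts : List (String × Int)) (out : Int × Int × Int) : Decidable (Spec_count_sizes word_counts out) := by unfold Spec_count_sizes; infer_instance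

-- ===== CLAIM (what is proved, stated in full; the proofs are below) =====
def Claim_equal_count_sizes : Prop := ∀ (word_counts : List (String × Int)), Dom_count_sizes word_counts → Spec_count_sizes word_counts (count_sizes word_counts)

-- ===== LEMMAS AND PROOFS =====

-- loop invariant for A's fold: it offsets each band's 0/1-sum by the accumulator
theorem count_sizes_foldl (word_counts : List (String × Int)) (s m l : Int) :
    word_counts.foldl
      (fun acc kv =>
        let (s, m, l) := acc
        let length : Int := PySem.Str.len kv.1
        if 0 ≤ length ∧ length ≤ 4 then (s + 1, m, l)
        else if 5 ≤ length ∧ length ≤ 7 then (s, m + 1, l)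
        else if 8 ≤ length then (s, m, l + 1)
        else (s, m, l)) (s, m, l)
    = (s + (word_counts.map (fun kv => if PySem.Str.len kv.1 ≤ 4 then (1 : Int) else 0)).sum,
       m + (word_counts.map (fun kv => if 5 ≤ PySem.Str.len kv.1 ∧ PySem.Str.len kv.1 ≤ 7 then (1 : Int) else 0)).sum,
       l + (word_counts.map (fun kv => if 8 ≤ PySem.Str.len kv.1 then (1 : Int) else 0)).sum) := by
  induction word_counts generalizing s m l with
  | nil => simp
  | cons kv tl ih =>
    have hlen : (0 : Int) ≤ PySem.Str.len kv.1 := by simp [PySem.Str.len]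
    simp only [List.foldl_cons, List.map_cons, List.sum_cons]
    by_cases h1 : 0 ≤ PySem.Str.len kv.1 ∧ PySem.Str.len kv.1 ≤ 4
    · rw [if_pos h1, ih, if_pos h1.2, if_neg (by omega), if_neg (by omega)]
      simp only [Prod.mk.injEq]
      refine ⟨by ring, by ring, by ring⟩
    · by_cases h2 : 5 ≤ PySem.Str.len kv.1 ∧ PySem.Str.len kv.1 ≤ 7
      · rw [if_neg h1, if_pos h2, ih, if_neg (by omega), if_pos h2, if_neg (by omega)]
        simp only [Prod.mk.injEq]
        refine ⟨by ring, by ring, by ring⟩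
      · have h3 : 8 ≤ PySem.Str.len kv.1 := by omega
        rw [if_neg h1, if_neg h2, if_pos h3, ih, if_neg (by omega), if_neg h2, if_pos h3]
        simp only [Prod.mk.injEq]
        refine ⟨by ring, by ring, by ring⟩

-- ===== VERDICT (by name: the statement is the Claim_ definition above) =====
theorem count_sizes_spec : Claim_equal_count_sizes := by
  intro wc _
  unfold Spec_count_sizes count_sizes count_sizes_alt
  simpa using count_sizes_foldl wc 0 0 0
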